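-- pv_equiv track=rewrite | github.com/pypi-data/pypi-mirror-386 | packages/timeslib/timeslib-0.5.0-py3-none-any.whl/timeslib/appdata.py | reset_dict_keys
-- ===== SOURCE A (Python) =====
-- def reset_dict_keys(
--     dict_list: list[dict], keys_to_reset: dict | None = None
-- ) -> list[dict]:
--     """
--     Reset specified keys in a list of dictionaries to given values.
--     """
--     output_data = []
--
--     if keys_to_reset:
--         for dictionary in dict_list:
--             new_dictionary = dict()
--             for k in dictionary.keys():
--                 if k not in keys_to_reset.keys():
--                     new_dictionary[k] = dictionary[k]
--                 else:
--                     new_dictionary[k] = keys_to_reset[k]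
--             output_data += [new_dictionary]
--         return output_data
--     else:
--         return dict_list
-- ===== SOURCE B (Python) =====
-- def reset_dict_keys(
--     dict_list: list[dict], keys_to_reset: dict | None = None
-- ) -> list[dict]:
--     """
--     Reset specified keys in a list of dictionaries to given values.
--     Copy-then-patch: shallow-copy each dict, then override in place the
--     reset keys that are already present (iterating the reset table).
--     """
--     if not keys_to_reset:
--         return dict_list
--     result = []
--     for d in dict_list:
--         patched = dict(d)
--         for k, v in keys_to_reset.items():
--             if k in patched:
--                 patched[k] = v
--         result.append(patched)
--     return result
-- ===== Notes on version B (the rewrite author's own statement) =====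
-- stated objective: simpler
-- what changed: A rebuilds every dict key-by-key with a per-key membership branch over the reset table; B shallow-copies each dict and patches it in place by iterating the reset table, overriding only keys already present.
import Mathlib
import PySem

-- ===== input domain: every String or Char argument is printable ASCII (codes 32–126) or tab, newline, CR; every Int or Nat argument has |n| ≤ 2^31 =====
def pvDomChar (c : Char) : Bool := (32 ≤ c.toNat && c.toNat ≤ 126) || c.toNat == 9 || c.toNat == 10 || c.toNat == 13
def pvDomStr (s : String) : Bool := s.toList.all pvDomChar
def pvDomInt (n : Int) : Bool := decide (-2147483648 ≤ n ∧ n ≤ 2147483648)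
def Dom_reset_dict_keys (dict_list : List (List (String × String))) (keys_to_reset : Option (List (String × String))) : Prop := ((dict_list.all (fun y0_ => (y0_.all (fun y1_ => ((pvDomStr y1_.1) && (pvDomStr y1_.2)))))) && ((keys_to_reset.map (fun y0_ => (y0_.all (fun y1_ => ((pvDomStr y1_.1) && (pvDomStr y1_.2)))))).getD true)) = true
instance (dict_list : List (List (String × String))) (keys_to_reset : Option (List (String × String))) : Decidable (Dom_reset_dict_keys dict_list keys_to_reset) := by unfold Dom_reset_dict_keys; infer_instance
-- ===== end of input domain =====

-- B replaces A's rebuild-every-dict-key-by-key-with-a-branch loop by copy-then-patch: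
-- each dict is copied and the (usually much shorter) reset table is iterated, overriding
-- only keys already present; objective: a simpler decomposition.

-- ===== PORT A =====
-- first-match association lookup with default "" (Python's dictionary[k]; on Pre_ inputs the key is always present)
def rdkLookupD (l : List (String × String)) (k : String) : String :=
  ((l.find? (fun q => q.1 == k)).map (·.2)).getD ""

-- inner loop of A over one dictionary: for k in dictionary.keys(): new[k] = … ;
-- on Pre_ inputs (distinct keys, as in a Python dict) assigning a fresh key appends.
def rdkBuild (d kr : List (String × String)) : List (String × String) :=
  d.foldl (fun nd p =>
    if (kr.find? (fun q => q.1 == p.1)).isNone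
    then nd ++ [(p.1, rdkLookupD d p.1)]
    else nd ++ [(p.1, rdkLookupD kr p.1)]) []

def reset_dict_keys (dict_list : List (List (String × String))) (keys_to_reset : Option (List (String × String))) : List (List (String × String)) :=
  let kr := keys_to_reset.getD []            -- 'if keys_to_reset:' — None and {} are falsy
  if kr.isEmpty then dict_list
  else dict_list.foldl (fun out d => out ++ [rdkBuild d kr]) []

-- ===== PORT B =====
-- 'patched[k] = v' overwrites the (on Pre_ inputs unique) entry with key k in place
def rdkPatch (d kr : List (String × String)) : List (String × String) :=
  kr.foldl (fun c p =>
    if c.any (fun q => q.1 == p.1)           -- 'if k in patched'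
    then c.map (fun q => if q.1 == p.1 then (q.1, p.2) else q)
    else c) d

def reset_dict_keys_alt (dict_list : List (List (String × String))) (keys_to_reset : Option (List (String × String))) : List (List (String × String)) :=
  match keys_to_reset with
  | none => dict_list
  | some [] => dict_list
  | some kr => dict_list.map (fun d => rdkPatch d kr)

-- ===== PRECONDITION & SPEC =====
-- Pre_ excludes only association lists with duplicated keys (in an inner dict or in keys_to_reset):
-- those do not represent any Python dict, so A's behaviour is not defined on them.
def Pre_reset_dict_keys (dict_list : List (List (String × String))) (keys_to_reset : Option (List (String × String))) : Prop :=
  (∀ d ∈ dict_list, (d.map Prod.fst).Nodup) ∧ ((keys_to_reset.getD []).map Prod.fst).Nodup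
instance (dict_list : List (List (String × String))) (keys_to_reset : Option (List (String × String))) : Decidable (Pre_reset_dict_keys dict_list keys_to_reset) := by unfold Pre_reset_dict_keys; infer_instance

def pvWitness_reset_dict_keys : (List (List (String × String))) × (Option (List (String × String))) :=
  ([[("a", "1"), ("b", "2")], [("b", "3")]], some [("b", "X"), ("c", "Y")])

def Spec_reset_dict_keys (dict_list : List (List (String × String))) (keys_to_reset : Option (List (String × String))) (out : List (List (String × String))) : Prop := out = reset_dict_keys_alt dict_list keys_to_reset
instance (dict_list : List (List (String × String))) (keys_to_reset : Option (List (String × String))) (out : List (List (String × String))) : Decidable (Spec_reset_dict_keys dict_list keys_to_reset out) := by unfold Spec_reset_dict_keys; infer_instance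

-- ===== CLAIM (what is proved, stated in full; the proofs are below) =====
def Claim_equal_reset_dict_keys : Prop := ∀ (dict_list : List (List (String × String))) (keys_to_reset : Option (List (String × String))), Dom_reset_dict_keys dict_list keys_to_reset → Pre_reset_dict_keys dict_list keys_to_reset → Spec_reset_dict_keys dict_list keys_to_reset (reset_dict_keys dict_list keys_to_reset)

-- ===== LEMMAS AND PROOFS =====

-- on a nodup-key list, looking up an element's own key gives its value
theorem rdkLookupD_mem (d : List (String × String)) (p : String × String)
    (hp : p ∈ d) (hnd : (d.map Prod.fst).Nodup) : rdkLookupD d p.1 = p.2 := by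
  induction d with
  | nil => cases hp
  | cons q d ih =>
    rw [List.map_cons] at hnd
    have h1 := (List.nodup_cons.1 hnd).1
    have h2 := (List.nodup_cons.1 hnd).2
    rcases List.mem_cons.1 hp with h | h
    · subst h; simp [rdkLookupD]
    · by_cases hk : q.1 = p.1
      · exact absurd (List.mem_map.2 ⟨p, h, hk.symm⟩) h1
      · simpa [rdkLookupD, hk] using ih h h2

-- B's guard is redundant: if no entry has the key, the map is the identity
theorem rdkStep_eq_map (d : List (String × String)) (p : String × String) :
    (if d.any (fun q => q.1 == p.1)
     then d.map (fun q => if q.1 == p.1 then (q.1, p.2) else q)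
     else d)
    = d.map (fun q => if q.1 == p.1 then (q.1, p.2) else q) := by
  by_cases h : d.any (fun q => q.1 == p.1)
  · simp [h]
  · simp only [List.any_eq_true, beq_iff_eq, not_exists, not_and] at h
    have hm : d.map (fun q => if q.1 == p.1 then (q.1, p.2) else q) = d := by
      conv_rhs => rw [← List.map_id d]
      exact List.map_congr_left fun q hq => by simp [h q hq]
    rw [hm]; simp

-- the whole patch loop acts entry-wise
theorem rdkPatch_eq_map (d kr : List (String × String)) :
    rdkPatch d kr
    = d.map (fun p => kr.foldl (fun x r => if x.1 == r.1 then (x.1, r.2) else x) p) := by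
  unfold rdkPatch
  induction kr generalizing d with
  | nil => simp
  | cons r kr ih =>
    rw [List.foldl_cons, rdkStep_eq_map d r, ih, List.map_map]
    simp only [List.foldl_cons]
    rfl

-- a substitution chain over keys all different from x's key leaves x unchanged
theorem rdkFold_fix (kr : List (String × String)) (x : String × String)
    (h : ∀ r ∈ kr, r.1 ≠ x.1) :
    kr.foldl (fun x r => if x.1 == r.1 then (x.1, r.2) else x) x = x := by
  induction kr with
  | nil => rfl
  | cons s kr ih =>
    rw [List.foldl_cons, if_neg (by simpa using Ne.symm (h s (List.mem_cons_self ..)))]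
    exact ih fun r hr => h r (List.mem_cons_of_mem _ hr)

-- with nodup reset keys, the entry-wise substitution chain is the first-match lookup
theorem rdkFold_entry (kr : List (String × String)) (p : String × String)
    (hnd : (kr.map Prod.fst).Nodup) :
    kr.foldl (fun x r => if x.1 == r.1 then (x.1, r.2) else x) p
    = match kr.find? (fun q => q.1 == p.1) with
      | some r => (p.1, r.2)
      | none => p := by
  induction kr with
  | nil => simp
  | cons r kr ih =>
    rw [List.map_cons] at hnd
    have h1 := (List.nodup_cons.1 hnd).1
    have h2 := (List.nodup_cons.1 hnd).2
    by_cases h : p.1 = r.1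
    · have hfix := rdkFold_fix kr (p.1, r.2)
        (fun r' hr' hc => h1 (List.mem_map.2 ⟨r', hr', by rw [hc, h]⟩))
      rw [List.foldl_cons, if_pos (by simpa using h),
        List.find?_cons_of_pos (by simpa using h.symm)]
      exact hfix
    · rw [List.foldl_cons, if_neg (by simpa using h),
        List.find?_cons_of_neg (by simpa using Ne.symm h)]
      exact ih h2

-- the two inner loops agree on one nodup-key dictionary
theorem rdkBuild_eq_patch (d kr : List (String × String))
    (hd : (d.map Prod.fst).Nodup) (hkr : (kr.map Prod.fst).Nodup) :
    rdkBuild d kr = rdkPatch d kr := by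
  rw [rdkPatch_eq_map]
  unfold rdkBuild
  have hbody : (fun (nd : List (String × String)) (p : String × String) =>
      if (kr.find? (fun q => q.1 == p.1)).isNone
      then nd ++ [(p.1, rdkLookupD d p.1)]
      else nd ++ [(p.1, rdkLookupD kr p.1)])
      = fun nd p => nd ++ [if (kr.find? (fun q => q.1 == p.1)).isNone
                           then (p.1, rdkLookupD d p.1)
                           else (p.1, rdkLookupD kr p.1)] := by
    funext nd p; split <;> rfl
  rw [hbody, PySem.List.foldl_append_singleton_eq_map, List.nil_append]
  apply List.map_congr_left
  intro p hp
  rw [rdkFold_entry kr p hkr]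
  cases hf : kr.find? (fun q => q.1 == p.1) with
  | none => simp [rdkLookupD_mem d p hp hd]
  | some r =>
    have hk : r.1 = p.1 := by simpa using List.find?_some hf
    simp [hf, rdkLookupD]

-- ===== VERDICT (by name: the statement is the Claim_ definition above) =====
theorem reset_dict_keys_spec : Claim_equal_reset_dict_keys := by
  intro dict_list keys_to_reset _ hpre
  unfold Spec_reset_dict_keys reset_dict_keys reset_dict_keys_alt
  obtain ⟨hdl, hkr⟩ := hpre
  cases keys_to_reset with
  | none => simp
  | some kr =>
    cases kr with
    | nil => simp
    | cons r kr' =>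
      simp only [Option.getD_some, List.isEmpty_cons, if_neg (by decide : ¬ false = true)]
      rw [PySem.List.foldl_append_singleton_eq_map, List.nil_append]
      exact List.map_congr_left fun d hd =>
        rdkBuild_eq_patch d (r :: kr') (hdl d hd) (by simpa using hkr)
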